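-- pv_equiv track=rewrite | github.com/ZeroCool2u/CensusQuery | CensusQuery.py | yearIndex
-- ===== SOURCE A (Python) =====
-- def yearIndex(names):
--     '''Produces a dictionary that uses the year as the key and generates a second dictionary, embedded, as
--   the value. The embedded dictionary uses name as the key and has a tuple (male, female) as its value.'''
--     yearDictionary = {}
--     for year, name, gender, count in names:
--         if year not in yearDictionary:
--             yearDictionary[year] = {}
--
--             if gender == 'M':
--                 yearDictionary[year][name] = (count, 0)  # Places value in the Male position.
--
--             else:
--                 yearDictionary[year][name] = (0, count)  # Places value in the Female position.
--
--         else: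
--
--             if name not in yearDictionary[year]:
--                 if gender == 'M':
--                     yearDictionary[year][name] = (count, 0)  # Places value in the Male position.
--                 else:
--                     yearDictionary[year][name] = (0, count)  # Places value in the Female position.
--             else:
--                 a, b = yearDictionary[year][name]
--
--                 if gender == 'M':
--                     yearDictionary[year][name] = count, b  # Places value in the Male position.
--                 else:
--                     yearDictionary[year][name] = a, count  # Places value in the Male position.
--
--     return yearDictionary
-- ===== SOURCE B (Python) =====
-- def yearIndex(names):
--     '''Produces a dictionary that uses the year as the key and generates a second dictionary, embedded, as
--   the value. The embedded dictionary uses name as the key and has a tuple (male, female) as its value.'''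
--     # Pass 1: flat dict keyed by (year, name); one uniform read-modify-write per row.
--     flat = {}
--     for year, name, gender, count in names:
--         m, f = flat.get((year, name), (0, 0))
--         flat[(year, name)] = (count, f) if gender == 'M' else (m, count)
--     # Pass 2: nest in insertion order.
--     result = {}
--     for (year, name), value in flat.items():
--         result.setdefault(year, {})[name] = value
--     return result
-- ===== Notes on version B (the rewrite author's own statement) =====
-- stated objective: alternative
-- what changed: A builds the nested year->name dict in one loop with three-way first-insert/update branching; B first builds a flat dict keyed by (year,name) with one uniform read-modify-write per row, then nests it in a second pass over the flat items in insertion order.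
import Mathlib
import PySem

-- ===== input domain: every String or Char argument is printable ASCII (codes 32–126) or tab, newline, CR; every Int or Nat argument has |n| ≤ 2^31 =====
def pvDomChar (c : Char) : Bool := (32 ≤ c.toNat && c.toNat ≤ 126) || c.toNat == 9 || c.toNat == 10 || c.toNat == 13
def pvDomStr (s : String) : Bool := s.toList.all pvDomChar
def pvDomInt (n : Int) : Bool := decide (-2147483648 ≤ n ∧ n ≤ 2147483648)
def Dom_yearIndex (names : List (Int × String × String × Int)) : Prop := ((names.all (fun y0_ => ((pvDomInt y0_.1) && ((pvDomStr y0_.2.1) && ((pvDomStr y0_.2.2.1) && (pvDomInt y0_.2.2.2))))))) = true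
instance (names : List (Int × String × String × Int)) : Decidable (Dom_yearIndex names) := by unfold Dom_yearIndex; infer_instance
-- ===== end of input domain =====

-- B builds a flat (year,name)-keyed dict in one uniform read-modify-write pass, then nests it in a
-- second pass; same return value as A (alternative decomposition, no speed claim).

-- ===== PORT A =====
-- one iteration of A's loop body (the nested not-in / in branching, verbatim)
def yearIndexStep (d : PySem.Dict Int (PySem.Dict String (Int × Int)))
    (row : Int × String × String × Int) : PySem.Dict Int (PySem.Dict String (Int × Int)) :=
  match row with
  | (year, name, gender, count) =>
    match d.get? year with
    | none =>      -- year not in yearDictionary: yearDictionary[year] = {}, then set name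
      if gender == "M" then d.insert year (PySem.Dict.empty.insert name (count, 0))
      else d.insert year (PySem.Dict.empty.insert name (0, count))
    | some inner =>
      match inner.get? name with
      | none =>    -- name not in yearDictionary[year]
        if gender == "M" then d.insert year (inner.insert name (count, 0))
        else d.insert year (inner.insert name (0, count))
      | some (a, b) =>
        if gender == "M" then d.insert year (inner.insert name (count, b))
        else d.insert year (inner.insert name (a, count))

def yearIndex (names : List (Int × String × String × Int)) : List (Int × List (String × Int × Int)) :=
  let yearDictionary := names.foldl yearIndexStep PySem.Dict.empty
  yearDictionary.items.map (fun p => (p.1, p.2.items))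

-- ===== PORT B =====
-- pass 1 body: flat[(year,name)] gets one uniform read-modify-write
def yearIndexFlatStep (flat : PySem.Dict (Int × String) (Int × Int))
    (row : Int × String × String × Int) : PySem.Dict (Int × String) (Int × Int) :=
  match row with
  | (year, name, gender, count) =>
    let mf := flat.getD (year, name) (0, 0)
    flat.insert (year, name) (if gender == "M" then (count, mf.2) else (mf.1, count))

-- pass 2 body: result.setdefault(year, {})[name] = value
def yearIndexNestStep (res : PySem.Dict Int (PySem.Dict String (Int × Int)))
    (p : (Int × String) × (Int × Int)) : PySem.Dict Int (PySem.Dict String (Int × Int)) :=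
  res.insert p.1.1 ((res.getD p.1.1 PySem.Dict.empty).insert p.1.2 p.2)

def yearIndexNest (l : List ((Int × String) × (Int × Int))) :
    PySem.Dict Int (PySem.Dict String (Int × Int)) :=
  l.foldl yearIndexNestStep PySem.Dict.empty

def yearIndex_alt (names : List (Int × String × String × Int)) : List (Int × List (String × Int × Int)) :=
  let flat := names.foldl yearIndexFlatStep PySem.Dict.empty
  let result := yearIndexNest flat.items
  result.items.map (fun p => (p.1, p.2.items))

-- ===== PRECONDITION & SPEC =====
def Spec_yearIndex (names : List (Int × String × String × Int)) (out : List (Int × List (String × Int × Int))) : Prop := out = yearIndex_alt names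
instance (names : List (Int × String × String × Int)) (out : List (Int × List (String × Int × Int))) : Decidable (Spec_yearIndex names out) := by unfold Spec_yearIndex; infer_instance

-- ===== CLAIM (what is proved, stated in full; the proofs are below) =====
def Claim_equal_yearIndex : Prop := ∀ (names : List (Int × String × String × Int)), Dom_yearIndex names → Spec_yearIndex names (yearIndex names)

-- ===== LEMMAS AND PROOFS =====

-- two inserts at distinct keys commute when the first key is already present
lemma insert_comm_of_contains {κ ν : Type} [BEq κ] [LawfulBEq κ]
    (d : PySem.Dict κ ν) (k k' : κ) (a b : ν)
    (hc : d.contains k = true) (hne : k ≠ k') :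
    (d.insert k a).insert k' b = (d.insert k' b).insert k a := by
  apply PySem.Dict.ext
  by_cases hc' : d.contains k' = true
  · rw [PySem.Dict.items_insert, PySem.Dict.items_insert,
        PySem.Dict.items_insert, PySem.Dict.items_insert]
    simp only [hc, hc', PySem.Dict.contains_insert, if_true, beq_iff_eq,
      Bool.or_true, List.map_map]
    apply List.map_congr_left
    intro p _
    by_cases h1 : p.1 = k <;> by_cases h2 : p.1 = k' <;>
      simp_all [Function.comp]
  · rw [PySem.Dict.items_insert, PySem.Dict.items_insert,
        PySem.Dict.items_insert, PySem.Dict.items_insert]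
    simp only [hc, hc', PySem.Dict.contains_insert, beq_iff_eq, hne.symm, if_true,
      Bool.or_false, Bool.or_true, if_false, List.map_append, List.map_cons,
      List.map_nil]
    simp [Ne.symm hne]

-- nestStep at the same (year,name) twice collapses to the last write
lemma nestStep_collapse (D : PySem.Dict Int (PySem.Dict String (Int × Int)))
    (y : Int) (n : String) (u v : Int × Int) :
    yearIndexNestStep (yearIndexNestStep D ((y, n), u)) ((y, n), v)
      = yearIndexNestStep D ((y, n), v) := by
  simp [yearIndexNestStep, PySem.Dict.getD_insert_self, PySem.Dict.insert_insert_self]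

-- nestStep at distinct years commutes when the first year is present
lemma nestStep_comm_year (D : PySem.Dict Int (PySem.Dict String (Int × Int)))
    (y y' : Int) (n n' : String) (v u : Int × Int)
    (hy : D.contains y = true) (hne : y ≠ y') :
    yearIndexNestStep (yearIndexNestStep D ((y, n), v)) ((y', n'), u)
      = yearIndexNestStep (yearIndexNestStep D ((y', n'), u)) ((y, n), v) := by
  simp only [yearIndexNestStep]
  rw [PySem.Dict.getD_insert_of_ne _ _ _ (Ne.symm hne), PySem.Dict.getD_insert_of_ne _ _ _ hne]
  exact insert_comm_of_contains D y y' _ _ hy hne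

-- nestStep at the same year, distinct names, commutes when the first name is present in the inner dict
lemma nestStep_comm_name (D : PySem.Dict Int (PySem.Dict String (Int × Int)))
    (y : Int) (n n' : String) (v u : Int × Int)
    (hn : (D.getD y PySem.Dict.empty).contains n = true) (hne : n ≠ n') :
    yearIndexNestStep (yearIndexNestStep D ((y, n), v)) ((y, n'), u)
      = yearIndexNestStep (yearIndexNestStep D ((y, n'), u)) ((y, n), v) := by
  simp only [yearIndexNestStep, PySem.Dict.getD_insert_self, PySem.Dict.insert_insert_self]
  rw [insert_comm_of_contains _ n n' v u hn hne]

-- the years present in the nested dict are exactly the years occurring in the flat items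
lemma nest_get?_none_iff (l : List ((Int × String) × (Int × Int))) (y : Int) :
    (yearIndexNest l).get? y = none ↔ y ∉ l.map (fun p => p.1.1) := by
  have hk : (yearIndexNest l).keys
      = PySem.Set.update PySem.Dict.empty.keys (l.map (fun p => p.1.1)) :=
    PySem.Dict.keys_foldl_insert_key l (fun p => p.1.1)
      (fun d p => (d.getD p.1.1 PySem.Dict.empty).insert p.1.2 p.2) PySem.Dict.empty
  rw [PySem.Dict.get?_eq_none_iff_not_mem_keys, hk]
  simp [PySem.Dict.keys_empty, PySem.Set.update_nil_left, PySem.Set.mem_ofList]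

lemma nest_append_singleton (l : List ((Int × String) × (Int × Int))) (e : (Int × String) × (Int × Int)) :
    yearIndexNest (l ++ [e]) = yearIndexNestStep (yearIndexNest l) e := by
  simp [yearIndexNest, List.foldl_append]

lemma get?_mk_append {κ ν : Type} [BEq κ] (l1 l2 : List (κ × ν)) (k : κ) :
    (PySem.Dict.mk (l1 ++ l2)).get? k = ((PySem.Dict.mk l1).get? k).or ((PySem.Dict.mk l2).get? k) := by
  induction l1 with
  | nil => simp [show (PySem.Dict.mk ([] : List (κ × ν))).get? k = none from rfl]
  | cons p rest ih =>
    cases p with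
    | mk k0 v0 =>
      rw [List.cons_append, PySem.Dict.get?_mk_cons, PySem.Dict.get?_mk_cons]
      by_cases h : (k0 == k) = true <;> simp [h, ih]

-- lookup correspondence: nested two-level lookup = flat lookup
lemma nest_lookup (l : List ((Int × String) × (Int × Int))) (h : (l.map (·.1)).Nodup)
    (y : Int) (n : String) :
    ((yearIndexNest l).get? y).bind (fun inner => inner.get? n)
      = (PySem.Dict.mk l).get? (y, n) := by
  induction l using List.reverseRecOn with
  | nil => simp [show (yearIndexNest []).get? y = none from rfl,
      show (PySem.Dict.mk ([] : List ((Int × String) × (Int × Int)))).get? (y, n) = none from rfl]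
  | append_singleton l e ih =>
    obtain ⟨⟨y0, n0⟩, v0⟩ := e
    simp only [List.map_append, List.map_cons, List.map_nil] at h
    have h' : (l.map (·.1)).Nodup := (List.nodup_append.mp h).1
    have hnotin : (y0, n0) ∉ l.map (·.1) := by
      have := (List.nodup_append.mp h).2.2
      intro hm; exact this _ hm _ (List.mem_singleton.mpr rfl) rfl
    rw [nest_append_singleton, get?_mk_append]
    simp only [yearIndexNestStep]
    by_cases hy : y = y0
    · subst hy
      rw [PySem.Dict.get?_insert_self]
      by_cases hn : n = n0
      · subst hn
        have hnone : (PySem.Dict.mk l).get? (y, n) = none := by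
          rw [PySem.Dict.get?_eq_none_iff_not_mem_keys, PySem.Dict.keys_mk]
          exact hnotin
        simp [hnone, PySem.Dict.get?_insert_self, PySem.Dict.get?_mk_cons]
      · rw [Option.bind_some]
        rw [PySem.Dict.get?_insert_of_ne _ _ hn]
        have hsing : (PySem.Dict.mk [((y, n0), v0)]).get? (y, n) = none := by
          rw [PySem.Dict.get?_mk_cons]
          simp [Ne.symm hn, show (PySem.Dict.mk ([] : List ((Int × String) × (Int × Int)))).get? (y, n) = none from rfl]
        rw [hsing, Option.or_none, ← ih h']
        rw [PySem.Dict.getD_eq_get?_getD]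
        cases hg : (yearIndexNest l).get? y <;>
          simp [show (PySem.Dict.empty : PySem.Dict String (Int × Int)).get? n = none from rfl]
    · rw [PySem.Dict.get?_insert_of_ne _ _ hy]
      have hsing : (PySem.Dict.mk [((y0, n0), v0)]).get? (y, n) = none := by
        rw [PySem.Dict.get?_mk_cons]
        simp [Ne.symm hy, show (PySem.Dict.mk ([] : List ((Int × String) × (Int × Int)))).get? (y, n) = none from rfl]
      rw [hsing, Option.or_none]
      exact ih h'

-- the central lemma, overwrite case: re-nesting after an in-place flat overwrite = one nestStep
lemma nest_insert_contains (k : Int × String) (v : Int × Int) :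
    ∀ l : List ((Int × String) × (Int × Int)), (l.map (·.1)).Nodup →
      (PySem.Dict.mk l).contains k = true →
      yearIndexNest ((PySem.Dict.mk l).insert k v).items
        = yearIndexNestStep (yearIndexNest l) (k, v) := by
  intro l
  induction l using List.reverseRecOn with
  | nil =>
    intro _ hc
    simp [show (PySem.Dict.mk ([] : List ((Int × String) × (Int × Int)))).contains k = false from rfl] at hc
  | append_singleton l' e ih =>
    intro h hc
    obtain ⟨⟨y0, n0⟩, u⟩ := e
    obtain ⟨y, n⟩ := k
    simp only [List.map_append, List.map_cons, List.map_nil] at h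
    have h' : (l'.map (·.1)).Nodup := (List.nodup_append.mp h).1
    have hnotin : ((y0, n0) : Int × String) ∉ l'.map (·.1) := by
      have hd := (List.nodup_append.mp h).2.2
      intro hm; exact hd _ hm _ (List.mem_singleton.mpr rfl) rfl
    rw [PySem.Dict.items_insert_of_contains _ v hc]
    show yearIndexNest (List.map _ (l' ++ [((y0, n0), u)])) = _
    rw [List.map_append]
    by_cases hk : ((y, n) : Int × String) = (y0, n0)
    · -- the overwritten key is the last item's key, absent from l'
      have hmapl : l'.map (fun p => if (p.1 == ((y, n) : Int × String)) = true then ((y, n), v) else p) = l' := by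
        conv_rhs => rw [← List.map_id l']
        apply List.map_congr_left
        intro p hp
        have : p.1 ≠ ((y, n) : Int × String) := by
          intro hpe; rw [hk] at hpe; exact hnotin (hpe ▸ List.mem_map_of_mem hp)
        simp [this]
      rw [hmapl]
      simp only [List.map_cons, List.map_nil, hk, beq_self_eq_true, if_true]
      rw [nest_append_singleton, nest_append_singleton]
      exact (nestStep_collapse (yearIndexNest l') y0 n0 u v).symm
    · -- the overwritten key lies inside l'
      have hc' : (PySem.Dict.mk l').contains ((y, n) : Int × String) = true := by
        rw [PySem.Dict.contains_iff_mem_keys] at hc ⊢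
        rw [PySem.Dict.keys_mk] at hc ⊢
        rw [List.map_append] at hc
        rcases List.mem_append.mp hc with hm | hm
        · exact hm
        · exact absurd (List.mem_singleton.mp hm) hk
      have hmapl : l'.map (fun p => if (p.1 == ((y, n) : Int × String)) = true then ((y, n), v) else p)
          = ((PySem.Dict.mk l').insert (y, n) v).items := by
        rw [PySem.Dict.items_insert_of_contains _ v hc']
      rw [hmapl]
      simp only [List.map_cons, List.map_nil]
      have hne0 : ((((y0, n0), u).1 == ((y, n) : Int × String)) = false) := by
        rw [beq_eq_false_iff_ne]; exact Ne.symm hk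
      simp only [hne0, Bool.false_eq_true, if_false]
      rw [nest_append_singleton, nest_append_singleton, ih h' hc']
      -- now commute the two nest steps
      by_cases hy : y = y0
      · subst hy
        have hn : n ≠ n0 := fun hn => hk (by rw [hn])
        have hsome : ∃ w, (PySem.Dict.mk l').get? ((y, n) : Int × String) = some w := by
          have := (PySem.Dict.contains_eq_isSome_get? (PySem.Dict.mk l') ((y, n) : Int × String)) ▸ hc'
          cases hg : (PySem.Dict.mk l').get? ((y, n) : Int × String) with
          | none => rw [hg] at this; simp at this
          | some w => exact ⟨w, rfl⟩
        obtain ⟨w, hw⟩ := hsome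
        have hlk := nest_lookup l' h' y n
        rw [hw] at hlk
        have hinner : ((yearIndexNest l').getD y PySem.Dict.empty).contains n = true := by
          cases hg : (yearIndexNest l').get? y with
          | none => rw [hg] at hlk; simp at hlk
          | some i =>
            rw [hg] at hlk
            rw [Option.bind_some] at hlk
            rw [PySem.Dict.getD_of_get?_eq_some _ _ hg, PySem.Dict.contains_eq_isSome_get?, hlk]
            rfl
        exact nestStep_comm_name (yearIndexNest l') y n n0 v u hinner hn
      · have hcy : (yearIndexNest l').contains y = true := by
          rw [PySem.Dict.contains_eq_isSome_get?]
          cases hg : (yearIndexNest l').get? y with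
          | none =>
            exfalso
            have := (nest_get?_none_iff l' y).mp hg
            apply this
            rw [PySem.Dict.contains_iff_mem_keys, PySem.Dict.keys_mk] at hc'
            rcases List.mem_map.mp hc' with ⟨p, hp, hpe⟩
            exact List.mem_map.mpr ⟨p, hp, by rw [hpe]⟩
          | some _ => rfl
        exact nestStep_comm_year (yearIndexNest l') y y0 n n0 v u hcy hy

-- the central lemma: nesting after a flat insert = one nestStep on the previous nesting
lemma nest_insertD (flat : PySem.Dict (Int × String) (Int × Int)) (h : flat.keys.Nodup)
    (k : Int × String) (v : Int × Int) :
    yearIndexNest ((flat.insert k v).items) = yearIndexNestStep (yearIndexNest flat.items) (k, v) := by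
  by_cases hc : (PySem.Dict.mk flat.items).contains k = true
  · exact nest_insert_contains k v flat.items (by rw [← PySem.Dict.keys_mk]; exact h) hc
  · rw [PySem.Dict.items_insert_of_not_contains _ v (Bool.eq_false_iff.mpr hc)]
    exact nest_append_singleton flat.items (k, v)

-- one A-step on nest(flat) = nest of one flat-step
lemma step_eq (flat : PySem.Dict (Int × String) (Int × Int)) (h : flat.keys.Nodup)
    (row : Int × String × String × Int) :
    yearIndexStep (yearIndexNest flat.items) row
      = yearIndexNest (yearIndexFlatStep flat row).items := by
  obtain ⟨y, n, g, c⟩ := row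
  have hnodup : (flat.items.map (·.1)).Nodup := by rw [← PySem.Dict.keys_mk]; exact h
  have hlk := nest_lookup flat.items hnodup y n
  simp only [yearIndexStep, yearIndexFlatStep]
  rw [nest_insertD flat h (y, n)]
  simp only [yearIndexNestStep]
  cases hD : (yearIndexNest flat.items).get? y with
  | none =>
    have hflat : flat.get? ((y, n) : Int × String) = none := by
      rw [hD] at hlk; exact hlk.symm ▸ rfl
    have hmf : flat.getD ((y, n) : Int × String) (0, 0) = (0, 0) :=
      PySem.Dict.getD_of_get?_eq_none _ _ hflat
    rw [PySem.Dict.getD_of_get?_eq_none _ _ hD, hmf]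
    by_cases hg : (g == "M") = true <;> simp [hg]
  | some inner =>
    rw [PySem.Dict.getD_of_get?_eq_some _ _ hD]
    rw [hD, Option.bind_some] at hlk
    cases hI : inner.get? n with
    | none =>
      have hmf : flat.getD ((y, n) : Int × String) (0, 0) = (0, 0) :=
        PySem.Dict.getD_of_get?_eq_none _ _ (by rw [← hlk]; exact hI)
      rw [hmf]
      by_cases hg : (g == "M") = true <;> simp [hg, hI]
    | some ab =>
      obtain ⟨a, b⟩ := ab
      have hmf : flat.getD ((y, n) : Int × String) (0, 0) = (a, b) :=
        PySem.Dict.getD_of_get?_eq_some _ _ (by rw [← hlk]; exact hI)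
      rw [hmf]
      by_cases hg : (g == "M") = true <;> simp [hg, hI]

lemma main_inv (names : List (Int × String × String × Int))
    (flat : PySem.Dict (Int × String) (Int × Int)) (h : flat.keys.Nodup) :
    names.foldl yearIndexStep (yearIndexNest flat.items)
      = yearIndexNest ((names.foldl yearIndexFlatStep flat).items) := by
  induction names generalizing flat with
  | nil => simp
  | cons row rest ih =>
    simp only [List.foldl_cons, step_eq flat h row]
    exact ih _ (by
      cases row with
      | mk y r => cases r with
        | mk n r' => exact PySem.Dict.nodup_keys_insert _ _ _ h)

-- ===== VERDICT (by name: the statement is the Claim_ definition above) =====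
theorem yearIndex_spec : Claim_equal_yearIndex := by
  intro names _
  show yearIndex names = yearIndex_alt names
  unfold yearIndex yearIndex_alt
  have h := main_inv names PySem.Dict.empty (by simp)
  rw [show yearIndexNest PySem.Dict.empty.items = PySem.Dict.empty from rfl] at h
  rw [h]
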